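-- pv_equiv track=rewrite | github.com/metanova-labs/nova | utils/nanobodies.py | max_run_length
-- ===== SOURCE A (Python) =====
-- def max_run_length(s: str) -> int:
--     """maximum length of a homopolymer run in a sequence"""
--     if not s:
--         return 0
--     best = 1
--     cur = 1
--     for i in range(1, len(s)):
--         if s[i] == s[i - 1]:
--             cur += 1
--             if cur > best:
--                 best = cur
--         else:
--             cur = 1
--     return best
-- ===== SOURCE B (Python) =====
-- def max_run_length(s: str) -> int:
--     """maximum length of a homopolymer run in a sequence"""
--     lengths = []
--     i, n = 0, len(s)
--     while i < n:
--         j = i + 1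
--         while j < n and s[j] == s[i]:
--             j += 1
--         lengths.append(j - i)
--         i = j
--     return max(lengths, default=0)
-- ===== Notes on version B (the rewrite author's own statement) =====
-- stated objective: alternative
-- what changed: Replaces A's single-pass running-counter-with-reset scan by a two-pointer run-splitting pass that collects the length of each maximal homopolymer run into a list and returns max(lengths, default=0).
import Mathlib
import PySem

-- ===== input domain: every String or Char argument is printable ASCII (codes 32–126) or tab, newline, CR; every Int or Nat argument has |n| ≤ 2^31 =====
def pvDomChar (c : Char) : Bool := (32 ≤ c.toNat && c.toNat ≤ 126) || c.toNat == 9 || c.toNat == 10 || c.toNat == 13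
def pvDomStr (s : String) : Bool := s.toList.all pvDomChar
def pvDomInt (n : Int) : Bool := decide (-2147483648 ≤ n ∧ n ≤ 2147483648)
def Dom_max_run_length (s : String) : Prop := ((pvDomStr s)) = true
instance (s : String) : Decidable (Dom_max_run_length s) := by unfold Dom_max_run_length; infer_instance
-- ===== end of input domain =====

-- B replaces A's running-counter-with-reset scan by a two-pointer run-splitting pass that
-- collects the length of each maximal run and takes the maximum (objective: alternative).

-- ===== PORT A =====
def max_run_length (s : String) : Int :=
  if s.toList = [] then 0
  else
    ((PySem.List.pyRange 1 (s.toList.length : Int) 1).foldl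
      (fun (st : Int × Int) i =>
        if PySem.List.pyGetD s.toList i ' ' = PySem.List.pyGetD s.toList (i - 1) ' ' then
          (if st.2 + 1 > st.1 then (st.2 + 1, st.2 + 1) else (st.1, st.2 + 1))
        else (st.1, 1))
      ((1 : Int), (1 : Int))).1

-- ===== PORT B =====
-- inner while loop: advance j while j < n and s[j] == s[i]  (guard keeps both indices in range,
-- so List.getD with a dummy default is exact here)
def altInner (cs : List Char) (i j : Nat) : Nat :=
  if h : j < cs.length ∧ cs.getD j ' ' = cs.getD i ' ' then altInner cs i (j + 1) else j
termination_by cs.length - j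

-- used by altOuter's termination proof
theorem altInner_ge (cs : List Char) (i : Nat) : ∀ j, j ≤ altInner cs i j := by
  have key : ∀ fuel j, cs.length - j ≤ fuel → j ≤ altInner cs i j := by
    intro fuel
    induction fuel with
    | zero =>
      intro j hj
      unfold altInner
      split
      · omega
      · exact le_refl j
    | succ n ih =>
      intro j hj
      unfold altInner
      split
      · exact le_trans (Nat.le_succ j) (ih (j + 1) (by omega))
      · exact le_refl j
  intro j; exact key (cs.length - j) j (le_refl _)

-- outer while loop: split off one maximal run at a time, recording its length
def altOuter (cs : List Char) (i : Nat) (lengths : List Int) : List Int :=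
  if _h : i < cs.length then
    let j := altInner cs i (i + 1)
    altOuter cs j (lengths ++ [(j : Int) - (i : Int)])
  else lengths
termination_by cs.length - i
decreasing_by have := altInner_ge cs i (i + 1); omega

-- max(lengths, default=0): exact as a fold since Python's max of ints is the left fold of max
def max_run_length_alt (s : String) : Int :=
  (altOuter s.toList 0 []).foldl max 0

-- ===== PRECONDITION & SPEC =====
def Spec_max_run_length (s : String) (out : Int) : Prop := out = max_run_length_alt s
instance (s : String) (out : Int) : Decidable (Spec_max_run_length s out) := by unfold Spec_max_run_length; infer_instance

-- ===== CLAIM (what is proved, stated in full; the proofs are below) =====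
def Claim_equal_max_run_length : Prop := ∀ (s : String), Dom_max_run_length s → Spec_max_run_length s (max_run_length s)

-- ===== LEMMAS AND PROOFS =====

-- length of the maximal leading run of character c
def leadRun (c : Char) : List Char → Nat
  | [] => 0
  | x :: xs => if x = c then leadRun c xs + 1 else 0

-- list of the lengths of the maximal runs, front to back
def runs : List Char → List Int
  | [] => []
  | c :: rest => ((leadRun c rest : Int) + 1) :: runs (rest.drop (leadRun c rest))
termination_by l => l.length
decreasing_by simp

theorem runs_nil : runs [] = [] := by conv_lhs => unfold runs

theorem runs_cons (c : Char) (rest : List Char) :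
    runs (c :: rest) = ((leadRun c rest : Int) + 1) :: runs (rest.drop (leadRun c rest)) := by
  conv_lhs => unfold runs

-- A's loop, rephrased as structural recursion carrying the previous character
def pairFold : Char → List Char → (Int × Int) → (Int × Int)
  | _, [], st => st
  | prev, x :: xs, st =>
      pairFold x xs
        (if x = prev then
          (if st.2 + 1 > st.1 then (st.2 + 1, st.2 + 1) else (st.1, st.2 + 1))
        else (st.1, 1))

theorem foldl_max_init (l : List Int) : ∀ a b, l.foldl max (max a b) = max a (l.foldl max b) := by
  induction l with
  | nil => intro a b; rfl
  | cons x xs ih =>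
    intro a b
    simp only [List.foldl_cons]
    rw [max_assoc, ih]

theorem le_foldl_max (l : List Int) : ∀ a, a ≤ l.foldl max a := by
  induction l with
  | nil => intro a; exact le_refl a
  | cons x xs ih =>
    intro a
    exact le_trans (le_max_left a x) (ih (max a x))

theorem fold_bridge (cs : List Char) : ∀ fuel k, cs.length - k ≤ fuel → k < cs.length → ∀ st,
    (PySem.List.pyRange ((k : Int) + 1) (cs.length : Int) 1).foldl
      (fun (st : Int × Int) i =>
        if PySem.List.pyGetD cs i ' ' = PySem.List.pyGetD cs (i - 1) ' ' then
          (if st.2 + 1 > st.1 then (st.2 + 1, st.2 + 1) else (st.1, st.2 + 1))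
        else (st.1, 1)) st
      = pairFold (cs.getD k ' ') (cs.drop (k + 1)) st := by
  intro fuel
  induction fuel with
  | zero => intro k h hk; omega
  | succ n ih =>
    intro k h hk st
    by_cases hk1 : k + 1 < cs.length
    · rw [PySem.List.pyRange_one_cons (by exact_mod_cast by omega)]
      have hdrop : cs.drop (k + 1) = cs[k + 1] :: cs.drop (k + 2) := by
        rw [List.drop_eq_getElem_cons hk1]
      have hget : ((k : Int) + 1) = ((k + 1 : Nat) : Int) := by push_cast; ring
      have hget2 : ((k : Int) + 1 - 1) = ((k : Nat) : Int) := by ring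
      simp only [List.foldl_cons]
      rw [hdrop]
      show _ = pairFold cs[k + 1] (cs.drop (k + 2)) _
      have hstep : (if PySem.List.pyGetD cs ((k : Int) + 1) ' ' = PySem.List.pyGetD cs ((k : Int) + 1 - 1) ' ' then
          (if st.2 + 1 > st.1 then (st.2 + 1, st.2 + 1) else (st.1, st.2 + 1))
        else (st.1, 1))
          = (if cs[k + 1] = cs.getD k ' ' then
          (if st.2 + 1 > st.1 then (st.2 + 1, st.2 + 1) else (st.1, st.2 + 1))
        else (st.1, 1)) := by
        rw [hget2, hget, PySem.List.pyGetD_natCast, PySem.List.pyGetD_natCast,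
          List.getD_eq_getElem cs ' ' hk1]
      rw [hstep]
      have hih := ih (k + 1) (by omega) hk1
        ((if cs[k + 1] = cs.getD k ' ' then
          (if st.2 + 1 > st.1 then (st.2 + 1, st.2 + 1) else (st.1, st.2 + 1))
        else (st.1, 1)))
      rw [show (((k + 1 : Nat) : Int)) = ((k : Int) + 1) by push_cast; ring,
        List.getD_eq_getElem cs ' ' hk1] at hih
      rw [hih]
    · have hlen : k + 1 = cs.length := by omega
      rw [PySem.List.pyRange_one_eq_nil (by exact_mod_cast by omega)]
      rw [List.drop_eq_nil_of_le (by omega)]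
      rfl

theorem pairFold_runs : ∀ (rest : List Char) (prev : Char) (best cur : Int),
    1 ≤ cur → cur ≤ best →
    (pairFold prev rest (best, cur)).1
      = max best ((runs (rest.drop (leadRun prev rest))).foldl max (cur + (leadRun prev rest : Int))) := by
  intro rest
  induction rest with
  | nil =>
    intro prev best cur h1 h2
    simp only [pairFold, leadRun, List.drop_nil, runs_nil, List.foldl_nil, Nat.cast_zero, add_zero]
    omega
  | cons x xs ih =>
    intro prev best cur h1 h2
    by_cases hx : x = prev
    · simp only [pairFold, leadRun, if_pos hx]
      have hstep : (if cur + 1 > best then (cur + 1, cur + 1) else (best, cur + 1))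
          = (max best (cur + 1), cur + 1) := by
        split <;> rename_i hgt
        · simp; omega
        · simp; omega
      rw [hstep, ih x (max best (cur + 1)) (cur + 1) (by omega) (by omega)]
      subst hx
      have harith : (cur + 1) + (leadRun x xs : Int) = cur + ((leadRun x xs : Nat) + 1 : Nat) := by
        push_cast; ring
      rw [List.drop_succ_cons, harith]
      have hK := le_foldl_max (runs (xs.drop (leadRun x xs)))
        (cur + ((leadRun x xs + 1 : Nat) : Int))
      have hle : cur + 1 ≤ cur + ((leadRun x xs + 1 : Nat) : Int) := by push_cast; omega
      omega
    · simp only [pairFold, leadRun, if_neg hx]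
      rw [ih x best 1 (le_refl 1) (by omega)]
      simp only [Nat.cast_zero, add_zero, List.drop_zero]
      show _ = max best ((runs (x :: xs)).foldl max cur)
      rw [runs_cons]
      simp only [List.foldl_cons]
      have e1 : List.foldl max (1 + (leadRun x xs : Int)) (runs (xs.drop (leadRun x xs)))
          = max 1 (List.foldl max ((leadRun x xs : Int) + 1) (runs (xs.drop (leadRun x xs)))) := by
        rw [show ((1 : Int) + (leadRun x xs : Int)) = max 1 ((leadRun x xs : Int) + 1) by omega,
          foldl_max_init]
      have e2 : List.foldl max (max cur ((leadRun x xs : Int) + 1)) (runs (xs.drop (leadRun x xs)))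
          = max cur (List.foldl max ((leadRun x xs : Int) + 1) (runs (xs.drop (leadRun x xs)))) :=
        foldl_max_init _ _ _
      rw [e1, e2]
      omega

theorem altInner_eq (cs : List Char) (i : Nat) :
    ∀ j, altInner cs i j = j + leadRun (cs.getD i ' ') (cs.drop j) := by
  have key : ∀ fuel j, cs.length - j ≤ fuel →
      altInner cs i j = j + leadRun (cs.getD i ' ') (cs.drop j) := by
    intro fuel
    induction fuel with
    | zero =>
      intro j hj
      unfold altInner
      rw [List.drop_eq_nil_of_le (by omega)]
      split <;> rename_i h
      · omega
      · simp [leadRun]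
    | succ n ih =>
      intro j hj
      unfold altInner
      by_cases hlt : j < cs.length
      · rw [List.drop_eq_getElem_cons hlt]
        rw [show cs.getD j ' ' = cs[j] from List.getD_eq_getElem cs ' ' hlt] at *
        by_cases heq : cs[j] = cs.getD i ' '
        · rw [dif_pos ⟨hlt, heq⟩, ih (j + 1) (by omega)]
          simp only [leadRun, if_pos heq]
          omega
        · rw [dif_neg (by tauto)]
          simp only [leadRun, if_neg heq, add_zero]
      · rw [dif_neg (by omega)]
        rw [List.drop_eq_nil_of_le (by omega)]
        simp [leadRun]
  intro j; exact key (cs.length - j) j (le_refl _)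

theorem altOuter_eq (cs : List Char) :
    ∀ fuel i acc, cs.length - i ≤ fuel → altOuter cs i acc = acc ++ runs (cs.drop i) := by
  intro fuel
  induction fuel with
  | zero =>
    intro i acc h
    unfold altOuter
    rw [dif_neg (by omega), List.drop_eq_nil_of_le (by omega)]
    simp [runs_nil]
  | succ n ih =>
    intro i acc h
    unfold altOuter
    by_cases hi : i < cs.length
    · rw [dif_pos hi]
      have hinner := altInner_eq cs i (i + 1)
      set L := leadRun (cs.getD i ' ') (cs.drop (i + 1)) with hL
      have hgei := altInner_ge cs i (i + 1)
      rw [ih (altInner cs i (i + 1)) _ (by omega)]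
      rw [hinner]
      have hdropi : cs.drop i = cs[i] :: cs.drop (i + 1) := List.drop_eq_getElem_cons hi
      have hgd : cs.getD i ' ' = cs[i] := List.getD_eq_getElem cs ' ' hi
      rw [hdropi, runs_cons]
      rw [hgd] at hL
      rw [← hL]
      have hcast : ((i + 1 + L : Nat) : Int) - (i : Nat) = (L : Int) + 1 := by push_cast; ring
      rw [hcast]
      have hdd : cs.drop (i + 1 + L) = (cs.drop (i + 1)).drop L := by
        rw [List.drop_drop]
      rw [hdd, List.append_assoc]
      rfl
    · rw [dif_neg hi, List.drop_eq_nil_of_le (by omega)]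
      simp [runs_nil]
  
theorem alt_eq_runs (s : String) :
    max_run_length_alt s = (runs s.toList).foldl max 0 := by
  unfold max_run_length_alt
  rw [altOuter_eq s.toList s.toList.length 0 [] (by omega)]
  simp

-- ===== VERDICT (by name: the statement is the Claim_ definition above) =====
theorem max_run_length_spec : Claim_equal_max_run_length := by
  intro s _
  unfold Spec_max_run_length
  rw [alt_eq_runs]
  unfold max_run_length
  by_cases hnil : s.toList = []
  · rw [if_pos hnil, hnil]
    simp [runs_nil]
  · rw [if_neg hnil]
    obtain ⟨c, rest, hcr⟩ := List.exists_cons_of_ne_nil hnil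
    have hlen : 0 < s.toList.length := by rw [hcr]; simp
    have hb := fold_bridge s.toList s.toList.length 0 (by omega) hlen ((1 : Int), (1 : Int))
    simp only [Nat.cast_zero, zero_add] at hb
    rw [hb]
    have hget0 : s.toList.getD 0 ' ' = c := by rw [hcr]; rfl
    have hdrop1 : s.toList.drop 1 = rest := by rw [hcr]; rfl
    rw [hget0, hdrop1]
    rw [pairFold_runs rest c 1 1 (le_refl 1) (le_refl 1)]
    rw [hcr, runs_cons]
    simp only [List.foldl_cons]
    rw [show max 0 ((leadRun c rest : Int) + 1) = (leadRun c rest : Int) + 1 by omega]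
    rw [show ((1 : Int) + (leadRun c rest : Int)) = max 1 ((leadRun c rest : Int) + 1) by omega]
    rw [foldl_max_init]
    have := le_foldl_max (runs (rest.drop (leadRun c rest))) ((leadRun c rest : Int) + 1)
    omega
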